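-- pv_equiv track=rewrite | github.com/graphsandstuff/Graph | Ed.py | ed3
-- ===== SOURCE A (Python) =====
-- import itertools
--
-- def idx(n):
--     "Creates identity matrix size n by n"
--     x=[]
--     for i in range(n):
--         x.append([])
--         for j in range(n):
--             if i==j:
--                 x[i].append(1)
--             else:
--                 x[i].append(0)
--     return x
--
-- def matxadd(x,y):
--     "Adds two matrices together"
--     xy=idx(len(x))
--     for i in range(len(x)):
--         if type(x[i])!=list:
--             xy[i]=(x[i]+y[i])%2
--         else:
--             for j in range(len(x[i])):
--                 xy[i][j]=(x[i][j]+y[i][j])%2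
--     return xy
--
-- def coladd(x,y):
--     "Adds two vectors together"
--     xy=[]
--     for i in range(len(x)):
--         xy.append((x[i]+y[i])%2)
--     return xy
--
-- def repeat(D):
--     "Checks if there no repeats"
--     for i in range(len(D)):
--         for j in range(len(D)):
--             if i!=j and D[i]==D[j]:
--                 return False
--     return True
--
-- def colsadd(D):
--     Y=D[0]
--     if len(D)==1:
--         return D
--     for i in range(len(D)-1):
--         Y=coladd(Y,D[i+1])
--     return Y
--
-- def ed3(G,x,y):
--     Z=coladd(x,y)
--     X=G+idx(len(G))+matxadd(G,idx(len(G)))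
--     for x1,x2,x3 in itertools.product(X,X,X):
--         D=[x1,x2,x3]
--         if repeat(D)==True:
--             if colsadd(D)==Z:
--                 return D
-- ===== SOURCE B (Python) =====
-- def ed3(G, x, y):
--     n = len(G)
--     I = [[1 if i == j else 0 for j in range(n)] for i in range(n)]
--     GI = [[(G[i][j] + I[i][j]) % 2 for j in range(len(G[i]))] for i in range(n)]
--     X = G + I + GI
--     Z = [(x[i] + y[i]) % 2 for i in range(len(x))]
--     if len(x) != n:
--         return None
--     # parity class -> up to 3 distinct rows of X, in first-occurrence order
--     classes = {}
--     for r in X: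
--         p = tuple(v % 2 for v in r)
--         lst = classes.setdefault(p, [])
--         if len(lst) < 3 and r not in lst:
--             lst.append(r)
--     for x1 in X:
--         for x2 in X:
--             if x1 == x2:
--                 continue
--             need = tuple((Z[i] - x1[i] - x2[i]) % 2 for i in range(n))
--             for r in classes.get(need, ()):
--                 if r != x1 and r != x2:
--                     return [x1, x2, r]
--     return None
-- ===== Notes on version B (the rewrite author's own statement) =====
-- stated objective: faster
-- what changed: Replaces the cubic scan over all ordered triples of rows by a pass over ordered pairs plus a hash index built once from parity vector to its first three distinct rows, so the inner scan for the third row disappears.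
-- outside the precondition, e.g. on ed3([[], []], [], []): A returns [[], [1, 0], [0, 1]], B returns None
import Mathlib
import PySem

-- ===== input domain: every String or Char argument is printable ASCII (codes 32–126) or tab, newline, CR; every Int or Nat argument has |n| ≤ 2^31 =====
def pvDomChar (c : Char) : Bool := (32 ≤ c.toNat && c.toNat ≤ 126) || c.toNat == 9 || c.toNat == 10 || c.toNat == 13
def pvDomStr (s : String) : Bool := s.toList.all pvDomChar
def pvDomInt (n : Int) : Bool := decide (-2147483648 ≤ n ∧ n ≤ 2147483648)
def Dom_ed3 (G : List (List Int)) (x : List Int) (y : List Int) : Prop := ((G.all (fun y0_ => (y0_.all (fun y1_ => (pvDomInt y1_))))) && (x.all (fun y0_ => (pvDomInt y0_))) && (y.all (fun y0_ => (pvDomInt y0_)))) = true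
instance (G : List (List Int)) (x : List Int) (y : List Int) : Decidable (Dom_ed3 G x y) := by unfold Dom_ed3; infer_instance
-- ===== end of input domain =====

-- B replaces A's cubic scan over ordered triples by a pair scan plus a hash index
-- (parity vector -> first three distinct rows), removing the inner scan (faster).

-- ===== PORT A =====
-- coladd: for i in range(len(x)): xy.append((x[i]+y[i])%2); y[i] raises IndexError
-- when len(y) < len(x) (excluded by Pre_); getD totalizes that unreachable access.
def coladdA (x y : List Int) : List Int :=
  (List.range x.length).map (fun i => PySem.Int.mod (x.getD i 0 + y.getD i 0) 2)

def idxA (n : Nat) : List (List Int) :=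
  (List.range n).map (fun i => (List.range n).map (fun j => if i = j then (1 : Int) else 0))

-- matxadd: rows of a List (List Int) are always lists, so the `type(x[i])!=list`
-- branch never fires; xy[i][j] is assigned for j < len(x[i]) (a row longer than
-- len(x) would raise IndexError in Python — excluded by Pre_), the identity entry
-- from xy = idx(len(x)) survives at positions j ≥ len(x[i]).
def matxaddA (x y : List (List Int)) : List (List Int) :=
  (List.range x.length).map (fun i =>
    let xi := x.getD i []
    let yi := y.getD i []
    let base := (idxA x.length).getD i []
    (List.range base.length).map (fun j =>
      if j < xi.length then PySem.Int.mod (xi.getD j 0 + yi.getD j 0) 2 else base.getD j 0))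

def repeatA (D : List (List Int)) : Bool :=
  (List.range D.length).all (fun i => (List.range D.length).all (fun j =>
    i == j || D.getD i [] != D.getD j []))

-- colsadd: the len(D)==1 branch (which returns D itself) is unreachable: ed3 only
-- calls colsadd on triples.
def colsaddA (D : List (List Int)) : List Int :=
  (List.range (D.length - 1)).foldl (fun Y i => coladdA Y (D.getD (i + 1) [])) (D.getD 0 [])

-- itertools.product(X,X,X) with early return = three nested first-hit searches
def ed3 (G : List (List Int)) (x : List Int) (y : List Int) : Option (List (List Int)) :=
  let Z := coladdA x y
  let X := G ++ idxA G.length ++ matxaddA G (idxA G.length)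
  X.findSome? (fun x1 => X.findSome? (fun x2 => X.findSome? (fun x3 =>
    let D := [x1, x2, x3]
    if repeatA D = true then (if colsaddA D = Z then some D else none) else none)))

-- ===== PORT B =====
def parityB (r : List Int) : List Int := r.map (fun v => PySem.Int.mod v 2)

def step3B (lst : List (List Int)) (r : List Int) : List (List Int) :=
  if lst.length < 3 && !(lst.contains r) then lst ++ [r] else lst

-- classes.setdefault(p, []) inserts p -> [] when absent; the conditional append is
-- rendered as an overwrite at the same key (insertion order preserved).
def classesB (X : List (List Int)) : PySem.Dict (List Int) (List (List Int)) :=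
  X.foldl (fun d r =>
    let p := parityB r
    d.insert p (step3B (d.getD p []) r)) PySem.Dict.empty

-- B's comprehensions index like the rest of the module (G[i][j], x[i], Z[i]); those
-- accesses are in range on every input Pre_ admits, and getD totalizes them here.
def ed3_alt (G : List (List Int)) (x : List Int) (y : List Int) : Option (List (List Int)) :=
  let n := G.length
  let I := (List.range n).map (fun i => (List.range n).map (fun j => if i = j then (1 : Int) else 0))
  let GI := (List.range n).map (fun i =>
    (List.range (G.getD i []).length).map (fun j =>
      PySem.Int.mod ((G.getD i []).getD j 0 + (I.getD i []).getD j 0) 2))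
  let X := G ++ I ++ GI
  let Z := (List.range x.length).map (fun i => PySem.Int.mod (x.getD i 0 + y.getD i 0) 2)
  if x.length ≠ n then none
  else
    let classes := classesB X
    X.findSome? (fun x1 => X.findSome? (fun x2 =>
      if x1 = x2 then none
      else
        let need := (List.range n).map (fun i => PySem.Int.mod (Z.getD i 0 - x1.getD i 0 - x2.getD i 0) 2)
        (classes.getD need []).findSome? (fun r =>
          if r ≠ x1 ∧ r ≠ x2 then some [x1, x2, r] else none)))

-- ===== PRECONDITION & SPEC =====
-- Pre_ restricts to the natural domain of this matrix code — G square and len(x) ≤ len(y);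
-- outside it A either raises IndexError (len(y) < len(x), or a row of G longer than
-- len(G), or a mixed-length distinct triple reached by colsadd) or pads short rows of
-- G with leftover identity entries in matxadd, an accident of the in-place update.
def Pre_ed3 (G : List (List Int)) (x : List Int) (y : List Int) : Prop :=
  x.length ≤ y.length ∧ ∀ r ∈ G, r.length = G.length
instance (G : List (List Int)) (x : List Int) (y : List Int) : Decidable (Pre_ed3 G x y) := by
  unfold Pre_ed3; infer_instance
def pvWitness_ed3 : List (List Int) × List Int × List Int := ([[0, 1], [1, 0]], [1, 0], [0, 1])

def Spec_ed3 (G : List (List Int)) (x : List Int) (y : List Int) (out : Option (List (List Int))) : Prop := out = ed3_alt G x y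
instance (G : List (List Int)) (x : List Int) (y : List Int) (out : Option (List (List Int))) : Decidable (Spec_ed3 G x y out) := by unfold Spec_ed3; infer_instance

-- ===== CLAIM (what is proved, stated in full; the proofs are below) =====
def Claim_equal_ed3 : Prop := ∀ (G : List (List Int)) (x : List Int) (y : List Int), Dom_ed3 G x y → Pre_ed3 G x y → Spec_ed3 G x y (ed3 G x y)

-- ===== LEMMAS AND PROOFS =====

theorem findSome?_congr {α β : Type} (f g : α → Option β) (l : List α)
    (h : ∀ a ∈ l, f a = g a) : l.findSome? f = l.findSome? g := by
  induction l with
  | nil => rfl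
  | cons a l ih =>
    simp only [List.findSome?_cons, h a (List.mem_cons_self), ih (fun b hb => h b (List.mem_cons_of_mem a hb))]

theorem findSome?_append {α β : Type} (f : α → Option β) (l l' : List α) :
    (l ++ l').findSome? f = (l.findSome? f).orElse (fun _ => l'.findSome? f) := by
  induction l with
  | nil => simp [Option.orElse]
  | cons a l ih =>
    simp only [List.cons_append, List.findSome?_cons, ih]
    cases f a <;> simp [Option.orElse]

theorem findSome?_ite_filter {α β : Type} (p : α → Bool) (g : α → Option β) (l : List α) :
    l.findSome? (fun a => if p a then g a else none) = (l.filter p).findSome? g := by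
  induction l with
  | nil => rfl
  | cons a l ih =>
    by_cases hp : p a
    · simp [List.findSome?_cons, hp, ih]
    · simp [hp, ih]

theorem nodup_le_two (v1 v2 : List Int) (acc : List (List Int)) (hnd : acc.Nodup)
    (hsub : ∀ a ∈ acc, a = v1 ∨ a = v2) : acc.length ≤ 2 := by
  match acc, hnd with
  | [], _ => simp
  | [a], _ => simp
  | [a, b], _ => simp
  | a :: b :: c :: l, hnd =>
    exfalso
    have ha := hsub a (by simp)
    have hb := hsub b (by simp)
    have hc := hsub c (by simp)
    simp [List.nodup_cons] at hnd
    rcases ha with rfl | rfl <;> rcases hb with hb | hb <;> rcases hc with hc | hc <;> simp_all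

theorem classes_getD (X : List (List Int)) (need : List Int) :
    (classesB X).getD need [] =
      (X.filter (fun r => parityB r == need)).foldl step3B [] := by
  have key : ∀ (X : List (List Int)) (d : PySem.Dict (List Int) (List (List Int))),
      (X.foldl (fun d r => d.insert (parityB r) (step3B (d.getD (parityB r) []) r)) d).getD need []
        = (X.filter (fun r => parityB r == need)).foldl step3B (d.getD need []) := by
    intro X
    induction X with
    | nil => intro d; rfl
    | cons r X ih =>
      intro d
      simp only [List.foldl_cons, List.filter_cons]
      by_cases hp : parityB r = need
      · subst hp
        simp only [beq_self_eq_true, if_pos, List.foldl_cons, ih]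
        rw [PySem.Dict.getD_insert]
        simp
      · have : (parityB r == need) = false := by simp [hp]
        simp only [this, Bool.false_eq_true, if_neg, ih, not_false_iff]
        rw [PySem.Dict.getD_insert]
        simp [Ne.symm hp]
  unfold classesB
  rw [key]
  rfl

theorem foldl3_findSome {β : Type} (v1 v2 : List Int) (g : List Int → Option β)
    (hg : ∀ r, g r = none → r = v1 ∨ r = v2) :
    ∀ (L acc : List (List Int)), acc.Nodup →
      (L.foldl step3B acc).findSome? g = (acc.findSome? g).orElse (fun _ => L.findSome? g) := by
  intro L
  induction L with
  | nil => intro acc _; cases h : acc.findSome? g <;> simp [Option.orElse, h]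
  | cons r L ih =>
    intro acc hnd
    simp only [List.foldl_cons]
    by_cases hcond : (acc.length < 3 && !(acc.contains r)) = true
    · have hr : r ∉ acc := by
        simp only [Bool.and_eq_true, Bool.not_eq_true'] at hcond
        simpa using hcond.2
      have hnd' : (acc ++ [r]).Nodup := by
        refine List.Nodup.append hnd (List.nodup_singleton r) ?_
        intro a ha hx
        rw [List.mem_singleton] at hx
        exact hr (hx ▸ ha)
      rw [step3B, if_pos hcond, ih (acc ++ [r]) hnd', findSome?_append]
      cases h : acc.findSome? g <;> cases h2 : g r <;>
        simp [Option.orElse, h2]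
    · rw [step3B, if_neg hcond, ih acc hnd]
      cases h : acc.findSome? g with
      | some b => simp [Option.orElse]
      | none =>
        have hall : ∀ a ∈ acc, g a = none := List.findSome?_eq_none_iff.mp h
        have hgr : g r = none := by
          simp only [Bool.and_eq_true, Bool.not_eq_true', not_and_or] at hcond
          rcases hcond with hlen | hmem
          · exfalso
            have hle := nodup_le_two v1 v2 acc hnd (fun a ha => hg a (hall a ha))
            simp at hlen
            omega
          · exact hall r (by simpa using hmem)
        simp [Option.orElse, hgr]

theorem coladdA_length (a b : List Int) : (coladdA a b).length = a.length := by
  simp [coladdA]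

theorem coladdA_getElem (a b : List Int) (i : Nat) (hi : i < a.length) (hib : i < b.length) :
    (coladdA a b)[i]'(by simpa [coladdA_length]) = PySem.Int.mod (a[i] + b[i]) 2 := by
  simp [coladdA, List.getD_eq_getElem?_getD, hi, hib]

theorem colsaddA_triple (a b c : List Int) : colsaddA [a, b, c] = coladdA (coladdA a b) c := rfl

theorem repeatA_triple (a b c : List Int) :
    repeatA [a, b, c] = true ↔ a ≠ b ∧ a ≠ c ∧ b ≠ c := by
  simp only [repeatA]
  constructor
  · intro h
    simp only [List.all_eq_true, List.mem_range] at h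
    have h01 := h 0 (by simp) 1 (by simp)
    have h02 := h 0 (by simp) 2 (by simp)
    have h12 := h 1 (by simp) 2 (by simp)
    simp at h01 h02 h12
    exact ⟨h01, h02, h12⟩
  · rintro ⟨h1, h2, h3⟩
    simp only [List.all_eq_true, List.mem_range, List.length_cons, List.length_nil]
    intro i hi j hj
    interval_cases i <;> interval_cases j <;> simp [h1, h2, h3, Ne.symm h1, Ne.symm h2, Ne.symm h3]

theorem mem_Z_bound (x y : List Int) (z : Int) (hz : z ∈ coladdA x y) : 0 ≤ z ∧ z < 2 := by
  simp only [coladdA, List.mem_map] at hz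
  obtain ⟨i, _, rfl⟩ := hz
  exact ⟨PySem.Int.mod_nonneg _ (by norm_num), PySem.Int.mod_lt _ (by norm_num)⟩

theorem colsadd_eq_iff (x1 x2 x3 Z : List Int) (n : Nat) (hn : Z.length = n)
    (h1 : x1.length = n) (h2 : x2.length = n) (h3 : x3.length = n)
    (hZ : ∀ z ∈ Z, 0 ≤ z ∧ z < 2) :
    coladdA (coladdA x1 x2) x3 = Z ↔
      parityB x3 = (List.range n).map (fun i => PySem.Int.mod (Z.getD i 0 - x1.getD i 0 - x2.getD i 0) 2) := by
  have hmod : ∀ a : Int, PySem.Int.mod a 2 = a % 2 := fun a => PySem.Int.mod_eq_emod_of_pos (by norm_num)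
  constructor
  · intro h
    apply List.ext_getElem
    · simp [parityB]; omega
    · intro i hpi hri
      have hi : i < n := by simpa using hri
      have := congrArg (fun l => l[i]?) h
      simp only [List.getElem?_eq_getElem, (by omega : i < Z.length),
        show i < (coladdA (coladdA x1 x2) x3).length by simp [coladdA_length]; omega] at this
      rw [coladdA_getElem _ _ i (by simp [coladdA_length]; omega) (by omega),
          coladdA_getElem _ _ i (by omega) (by omega)] at this
      have hzb := hZ (Z[i]'(by omega)) (List.getElem_mem _)
      simp only [Option.some.injEq, hmod] at this
      simp only [parityB, List.getElem_map, List.getElem_range]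
      rw [List.getD_eq_getElem _ _ (by omega : i < Z.length),
          List.getD_eq_getElem _ _ (by omega : i < x1.length),
          List.getD_eq_getElem _ _ (by omega : i < x2.length)]
      simp only [hmod]
      omega
  · intro h
    apply List.ext_getElem
    · simp [coladdA_length]; omega
    · intro i hli hri
      have hi : i < n := by omega
      have := congrArg (fun l => l[i]?) h
      simp only [List.getElem?_eq_getElem,
        show i < (parityB x3).length by simp [parityB]; omega,
        show i < ((List.range n).map (fun i => PySem.Int.mod (Z.getD i 0 - x1.getD i 0 - x2.getD i 0) 2)).length by simpa] at this
      simp only [parityB, List.getElem_map, List.getElem_range, Option.some.injEq] at this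
      rw [List.getD_eq_getElem _ _ (by omega : i < Z.length),
          List.getD_eq_getElem _ _ (by omega : i < x1.length),
          List.getD_eq_getElem _ _ (by omega : i < x2.length)] at this
      rw [coladdA_getElem _ _ i (by simp [coladdA_length]; omega) (by omega),
          coladdA_getElem _ _ i (by omega) (by omega)]
      have hzb := hZ (Z[i]'(by omega)) (List.getElem_mem _)
      simp only [hmod] at this ⊢
      omega

theorem idxA_length (n : Nat) : (idxA n).length = n := by simp [idxA]

theorem idxA_getElem (n i : Nat) (hi : i < n) :
    (idxA n)[i]'(by simpa [idxA_length]) = (List.range n).map (fun j => if i = j then (1 : Int) else 0) := by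
  simp [idxA]

theorem idxA_getD (n i : Nat) (hi : i < n) :
    (idxA n).getD i [] = (List.range n).map (fun j => if i = j then (1 : Int) else 0) := by
  rw [List.getD_eq_getElem _ _ (by simpa [idxA_length]), idxA_getElem n i hi]

theorem idxA_getD_length (n i : Nat) (hi : i < n) : ((idxA n).getD i []).length = n := by
  rw [idxA_getD n i hi]; simp

theorem matxadd_eq_rows (G : List (List Int)) (h : ∀ r ∈ G, r.length = G.length) :
    matxaddA G (idxA G.length) =
      (List.range G.length).map (fun i =>
        (List.range (G.getD i []).length).map (fun j =>
          PySem.Int.mod ((G.getD i []).getD j 0 + ((idxA G.length).getD i []).getD j 0) 2)) := by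
  simp only [matxaddA]
  apply List.map_congr_left
  intro i hi
  have hiG : i < G.length := List.mem_range.mp hi
  have hGgetD : G.getD i [] = G[i] := List.getD_eq_getElem _ _ hiG
  have hlen : (G.getD i []).length = G.length := by rw [hGgetD]; exact h G[i] (List.getElem_mem hiG)
  have hbase : ((idxA G.length).getD i []).length = G.length := idxA_getD_length _ _ hiG
  rw [hbase, hlen]
  apply List.map_congr_left
  intro j hj
  have hjn : j < G.length := List.mem_range.mp hj
  rw [if_pos hjn]

theorem mem_X_length (G : List (List Int)) (h : ∀ r ∈ G, r.length = G.length)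
    (r : List Int) (hr : r ∈ G ++ idxA G.length ++ matxaddA G (idxA G.length)) :
    r.length = G.length := by
  simp only [List.mem_append] at hr
  rcases hr with (hr | hr) | hr
  · exact h r hr
  · simp only [idxA, List.mem_map, List.mem_range] at hr
    obtain ⟨i, _, rfl⟩ := hr
    simp
  · simp only [matxaddA, List.mem_map, List.mem_range] at hr
    obtain ⟨i, hi, rfl⟩ := hr
    simp only [List.length_map, List.length_range, idxA_getD_length _ _ hi]

theorem ed3_main (G : List (List Int)) (x : List Int) (y : List Int)
    (hsq : ∀ r ∈ G, r.length = G.length) :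
    ed3 G x y = ed3_alt G x y := by
  simp only [ed3, ed3_alt]
  have hI : (List.range G.length).map (fun i => (List.range G.length).map (fun j => if i = j then (1 : Int) else 0)) = idxA G.length := rfl
  have hZ0 : (List.range x.length).map (fun i => PySem.Int.mod (x.getD i 0 + y.getD i 0) 2) = coladdA x y := rfl
  rw [hI, hZ0, ← matxadd_eq_rows G hsq]
  set X := G ++ idxA G.length ++ matxaddA G (idxA G.length) with hX
  set Z := coladdA x y with hZdef
  have hZlen : Z.length = x.length := coladdA_length x y
  by_cases heq : x.length = G.length
  · -- lengths match: real search on both sides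
    rw [if_neg (by simp [heq])]
    apply findSome?_congr
    intro x1 hx1
    apply findSome?_congr
    intro x2 hx2
    have hl1 : x1.length = G.length := mem_X_length G hsq x1 hx1
    have hl2 : x2.length = G.length := mem_X_length G hsq x2 hx2
    by_cases h12 : x1 = x2
    · rw [if_pos h12]
      apply List.findSome?_eq_none_iff.mpr
      intro x3 _
      rw [if_neg]
      simp only [repeatA_triple, h12]
      tauto
    · rw [if_neg h12]
      have hterm : ∀ x3 ∈ X,
          (if repeatA [x1, x2, x3] = true then
            (if colsaddA [x1, x2, x3] = Z then some [x1, x2, x3] else none) else none)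
          = (if (parityB x3 == ((List.range G.length).map (fun i => PySem.Int.mod (Z.getD i 0 - x1.getD i 0 - x2.getD i 0) 2))) = true then
              (if x3 ≠ x1 ∧ x3 ≠ x2 then some [x1, x2, x3] else none) else none) := by
        intro x3 hx3
        have hl3 : x3.length = G.length := mem_X_length G hsq x3 hx3
        have hcol := colsadd_eq_iff x1 x2 x3 Z G.length (by omega) hl1 hl2 hl3 (mem_Z_bound x y)
        rw [colsaddA_triple] at *
        by_cases hp : parityB x3 = (List.range G.length).map (fun i => PySem.Int.mod (Z.getD i 0 - x1.getD i 0 - x2.getD i 0) 2)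
        · by_cases hq : x3 ≠ x1 ∧ x3 ≠ x2
          · have h31 : x1 ≠ x3 := Ne.symm hq.1
            have h32 : x2 ≠ x3 := Ne.symm hq.2
            simp [repeatA_triple, h12, h31, h32, hcol, hp, hq.1, hq.2]
          · have : x3 = x1 ∨ x3 = x2 := by tauto
            rcases this with rfl | rfl
            · simp [repeatA_triple, hp]
            · simp [repeatA_triple, hp]
        · have hc : ¬(coladdA (coladdA x1 x2) x3 = Z) := fun h => hp (hcol.mp h)
          have hbeq : ¬((parityB x3 == (List.range G.length).map (fun i => PySem.Int.mod (Z.getD i 0 - x1.getD i 0 - x2.getD i 0) 2)) = true) := by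
            simpa using hp
          rw [if_neg hbeq, if_neg hc]
          exact ite_self none
      rw [findSome?_congr _ _ X hterm, findSome?_ite_filter, classes_getD]
      have hg : ∀ r : List Int, (if r ≠ x1 ∧ r ≠ x2 then some [x1, x2, r] else none) = none → r = x1 ∨ r = x2 := by
        intro r hr
        by_contra hcon
        push Not at hcon
        rw [if_pos ⟨hcon.1, hcon.2⟩] at hr
        simp at hr
      rw [foldl3_findSome x1 x2 _ hg _ [] List.nodup_nil]
      rfl
  · -- length mismatch: A's comparison never succeeds, B bails out at its guard
    rw [if_pos heq]
    apply List.findSome?_eq_none_iff.mpr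
    intro x1 hx1
    apply List.findSome?_eq_none_iff.mpr
    intro x2 _
    apply List.findSome?_eq_none_iff.mpr
    intro x3 _
    by_cases hrep : repeatA [x1, x2, x3] = true
    · rw [if_pos hrep, if_neg]
      intro hc
      have := congrArg List.length hc
      rw [colsaddA_triple, coladdA_length, coladdA_length, mem_X_length G hsq x1 hx1, hZlen] at this
      exact heq this.symm
    · rw [if_neg hrep]

-- ===== VERDICT (by name: the statement is the Claim_ definition above) =====
theorem ed3_spec : Claim_equal_ed3 := by
  intro G x y _ hpre
  exact ed3_main G x y hpre.2
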